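-- pv_equiv track=rewrite | github.com/joelhallauer/Graham_algo | Graham_Scan.py | get_lowest_y
-- ===== SOURCE A (Python) =====
-- def get_lowest_y(li):
--     # Überprüfen, ob die Liste leer ist
--     if not li:
--         return None  # Gibt None zurück, wenn die Liste leer ist
--
--     # Initialisiere die Variable für den kleinsten Y-Wert
--     kleinster_y_wert = li[0][1]
--     x_wert = li[0][0]
--
--     # Gehe durch jeden Eintrag in der Liste
--     for x, y in li:
--         # Überprüfe, ob der aktuelle Y-Wert kleiner ist oder bei Gleichheit der X-Wert kleiner ist
--         if y < kleinster_y_wert or (y == kleinster_y_wert and x < x_wert):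
--             kleinster_y_wert = y
--             x_wert = x
--
--     return x_wert, kleinster_y_wert
-- ===== SOURCE B (Python) =====
-- def get_lowest_y(li):
--     if not li:
--         return None
--     min_y = min(p[1] for p in li)
--     min_x = min(p[0] for p in li if p[1] == min_y)
--     return (min_x, min_y)
-- ===== Notes on version B (the rewrite author's own statement) =====
-- stated objective: simpler
-- what changed: Replaced the single fused scan maintaining a running lexicographic best (y then x) by two plain min() passes: first the minimum y, then the minimum x among points attaining that y.
import Mathlib
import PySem

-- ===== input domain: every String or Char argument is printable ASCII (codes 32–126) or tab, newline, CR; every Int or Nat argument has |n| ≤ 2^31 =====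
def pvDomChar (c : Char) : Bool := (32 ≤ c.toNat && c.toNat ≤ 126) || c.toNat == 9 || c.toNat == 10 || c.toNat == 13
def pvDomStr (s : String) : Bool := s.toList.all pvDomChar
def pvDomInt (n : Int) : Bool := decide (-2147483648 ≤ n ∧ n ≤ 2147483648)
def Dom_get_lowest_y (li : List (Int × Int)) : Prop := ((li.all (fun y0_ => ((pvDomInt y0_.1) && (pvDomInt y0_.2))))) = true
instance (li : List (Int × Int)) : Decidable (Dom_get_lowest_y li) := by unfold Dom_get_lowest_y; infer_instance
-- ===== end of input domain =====

-- B replaces A's single fused scan (running lexicographic best on (y, x)) by two plain min passes: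
-- the minimum y, then the minimum x among points attaining it; same result, simpler decomposition.

-- ===== PORT A =====
-- the loop body of A: update the running best (x_wert, kleinster_y_wert)
def pvStepA (acc : Int × Int) (p : Int × Int) : Int × Int :=
  if p.2 < acc.2 ∨ (p.2 = acc.2 ∧ p.1 < acc.1) then (p.1, p.2) else acc

def get_lowest_y (li : List (Int × Int)) : Option (Int × Int) :=
  match li with
  | [] => none
  | (x0, y0) :: _ => some (li.foldl pvStepA (x0, y0))

-- ===== PORT B =====
-- min(iterable) for a nonempty list of Ints: head as start, fold min over the tail
def get_lowest_y_alt (li : List (Int × Int)) : Option (Int × Int) :=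
  match li.map Prod.snd with
  | [] => none
  | y0 :: ys =>
    let minY := ys.foldl min y0
    match (li.filter (fun p => p.2 == minY)).map Prod.fst with
    | [] => none  -- unreachable: minY is attained
    | x0 :: xs => some (xs.foldl min x0, minY)

-- ===== PRECONDITION & SPEC =====
def Spec_get_lowest_y (li : List (Int × Int)) (out : Option (Int × Int)) : Prop := out = get_lowest_y_alt li
instance (li : List (Int × Int)) (out : Option (Int × Int)) : Decidable (Spec_get_lowest_y li out) := by unfold Spec_get_lowest_y; infer_instance

-- ===== CLAIM (what is proved, stated in full; the proofs are below) =====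
def Claim_equal_get_lowest_y : Prop := ∀ (li : List (Int × Int)), Dom_get_lowest_y li → Spec_get_lowest_y li (get_lowest_y li)

-- ===== LEMMAS AND PROOFS =====

-- lexicographic "at most" on (y, x)
def pvLexLe (a b : Int × Int) : Prop := a.2 < b.2 ∨ (a.2 = b.2 ∧ a.1 ≤ b.1)

theorem pvLexLe_trans {a b c : Int × Int} (h1 : pvLexLe a b) (h2 : pvLexLe b c) : pvLexLe a c := by
  unfold pvLexLe at *; omega

theorem pvLexLe_antisymm {a b : Int × Int} (h1 : pvLexLe a b) (h2 : pvLexLe b a) : a = b := by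
  unfold pvLexLe at *
  have : a.1 = b.1 ∧ a.2 = b.2 := by omega
  exact Prod.ext this.1 this.2

theorem pvStepA_eq_or (acc p : Int × Int) : pvStepA acc p = p ∨ pvStepA acc p = acc := by
  unfold pvStepA; split_ifs with h
  · exact Or.inl rfl
  · exact Or.inr rfl

theorem pvStepA_le_left (acc p : Int × Int) : pvLexLe (pvStepA acc p) acc := by
  unfold pvStepA pvLexLe
  split_ifs with h
  · dsimp only; omega
  · omega

theorem pvStepA_le_right (acc p : Int × Int) : pvLexLe (pvStepA acc p) p := by
  unfold pvStepA pvLexLe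
  split_ifs with h
  · dsimp only; omega
  · omega

theorem pvFoldA_mem : ∀ (t : List (Int × Int)) (a : Int × Int), t.foldl pvStepA a ∈ a :: t := by
  intro t
  induction t with
  | nil => intro a; simp [List.foldl]
  | cons p t ih =>
    intro a
    have h := ih (pvStepA a p)
    rcases pvStepA_eq_or a p with he | he <;>
      simp only [List.foldl] <;> rcases List.mem_cons.mp h with h' | h' <;>
        simp [List.mem_cons, h'] <;> tauto

theorem pvFoldA_le : ∀ (t : List (Int × Int)) (a q : Int × Int), q ∈ a :: t →
    pvLexLe (t.foldl pvStepA a) q := by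
  intro t
  induction t with
  | nil =>
    intro a q hq
    simp at hq
    subst hq
    exact Or.inr ⟨rfl, le_refl _⟩
  | cons p t ih =>
    intro a q hq
    simp only [List.foldl]
    rcases List.mem_cons.mp hq with h | h
    · subst h
      exact pvLexLe_trans (ih (pvStepA _ p) _ (List.mem_cons_self)) (pvStepA_le_left _ _)
    rcases List.mem_cons.mp h with h | h
    · subst h
      exact pvLexLe_trans (ih (pvStepA a _) _ (List.mem_cons_self)) (pvStepA_le_right _ _)
    · exact ih (pvStepA a p) q (List.mem_cons_of_mem _ h)

theorem pvMinFold_le_init : ∀ (l : List Int) (a : Int), l.foldl min a ≤ a := by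
  intro l
  induction l with
  | nil => intro a; simp
  | cons h t ih =>
    intro a
    calc t.foldl min (min a h) ≤ min a h := ih (min a h)
    _ ≤ a := min_le_left _ _

theorem pvMinFold_le_mem : ∀ (l : List Int) (a x : Int), x ∈ l → l.foldl min a ≤ x := by
  intro l
  induction l with
  | nil => intro a x hx; simp at hx
  | cons h t ih =>
    intro a x hx
    rcases List.mem_cons.mp hx with rfl | hx
    · calc t.foldl min (min a x) ≤ min a x := pvMinFold_le_init t _
      _ ≤ x := min_le_right _ _
    · exact ih (min a h) x hx

theorem pvMinFold_mem : ∀ (l : List Int) (a : Int), l.foldl min a = a ∨ l.foldl min a ∈ l := by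
  intro l
  induction l with
  | nil => intro a; simp
  | cons h t ih =>
    intro a
    simp only [List.foldl]
    rcases ih (min a h) with he | he
    · rcases min_choice a h with hm | hm <;> rw [he, hm]
      · exact Or.inl rfl
      · exact Or.inr (List.mem_cons_self)
    · exact Or.inr (List.mem_cons_of_mem _ he)

-- step with equal arguments is a no-op (A's loop revisits the head)
theorem pvStepA_self (a : Int × Int) : pvStepA a a = a := by
  unfold pvStepA; split_ifs with h
  · omega
  · rfl

-- ===== VERDICT (by name: the statement is the Claim_ definition above) =====
theorem get_lowest_y_spec : Claim_equal_get_lowest_y := by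
  intro li _
  unfold Spec_get_lowest_y
  match li with
  | [] => rfl
  | (x0, y0) :: t =>
    -- A's result
    simp only [get_lowest_y, List.foldl, pvStepA_self]
    set r := t.foldl pvStepA (x0, y0) with hr
    have hrmem : r ∈ (x0, y0) :: t := pvFoldA_mem t (x0, y0)
    have hrle : ∀ q ∈ (x0, y0) :: t, pvLexLe r q := fun q hq => pvFoldA_le t (x0, y0) q hq
    -- B's shape
    have hmap : ((x0, y0) :: t).map Prod.snd = y0 :: t.map Prod.snd := rfl
    simp only [get_lowest_y_alt, hmap]
    set minY := (t.map Prod.snd).foldl min y0 with hminY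
    -- minY is a lower bound of all snds
    have hminY_le : ∀ q ∈ (x0, y0) :: t, minY ≤ q.2 := by
      intro q hq
      rcases List.mem_cons.mp hq with rfl | hq
      · exact pvMinFold_le_init _ _
      · exact pvMinFold_le_mem _ _ _ (List.mem_map_of_mem hq)
    -- minY is attained by some element
    have hatt : ∃ q ∈ (x0, y0) :: t, q.2 = minY := by
      rcases pvMinFold_mem (t.map Prod.snd) y0 with he | he
      · exact ⟨(x0, y0), List.mem_cons_self, he.symm⟩
      · rcases List.mem_map.mp he with ⟨q, hq, hq2⟩
        exact ⟨q, List.mem_cons_of_mem _ hq, hq2⟩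
    -- the filtered list of x-coordinates is nonempty
    rcases hatt with ⟨q, hqmem, hq2⟩
    have hqfil : q ∈ ((x0, y0) :: t).filter (fun p => p.2 == minY) :=
      List.mem_filter.mpr ⟨hqmem, by simp [hq2]⟩
    have hne : (((x0, y0) :: t).filter (fun p => p.2 == minY)).map Prod.fst ≠ [] := by
      intro hnil
      exact (List.ne_nil_of_mem (List.mem_map_of_mem hqfil)) hnil
    rcases hxl : (((x0, y0) :: t).filter (fun p => p.2 == minY)).map Prod.fst with _ | ⟨fx, fxs⟩
    · exact absurd hxl hne
    -- B's candidate b = (minX, minY)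
    set minX := fxs.foldl min fx with hminX
    -- minX is attained: b ∈ li
    have hbmem : (minX, minY) ∈ (x0, y0) :: t := by
      have hmx : minX ∈ fx :: fxs := by
        rcases pvMinFold_mem fxs fx with he | he
        · exact he ▸ List.mem_cons_self
        · exact List.mem_cons_of_mem _ he
      rw [← hxl] at hmx
      rcases List.mem_map.mp hmx with ⟨p, hpfil, hp1⟩
      have hp2 : p.2 = minY := by
        have := (List.mem_filter.mp hpfil).2
        simpa using this
      have : p = (minX, minY) := Prod.ext hp1 hp2
      exact this ▸ (List.mem_filter.mp hpfil).1
    -- b is a lex lower bound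
    have hble : ∀ p ∈ (x0, y0) :: t, pvLexLe (minX, minY) p := by
      intro p hp
      rcases lt_or_eq_of_le (hminY_le p hp) with hlt | heq
      · exact Or.inl hlt
      · refine Or.inr ⟨heq, ?_⟩
        have hpfil : p ∈ ((x0, y0) :: t).filter (fun p => p.2 == minY) :=
          List.mem_filter.mpr ⟨hp, by simp [heq]⟩
        have : p.1 ∈ fx :: fxs := hxl ▸ List.mem_map_of_mem hpfil
        rcases List.mem_cons.mp this with he | he
        · calc minX ≤ fx := pvMinFold_le_init fxs fx
          _ = p.1 := he.symm
        · exact pvMinFold_le_mem fxs fx p.1 he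
    have : r = (minX, minY) :=
      pvLexLe_antisymm (hrle _ hbmem) (hble r hrmem)
    rw [this, hxl]
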